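-- pv_equiv track=rewrite | github.com/tiago2904santos/Automacao-Central-de-Viagens | viagens/views.py | _build_trechos_from_sede_destinos
-- ===== SOURCE A (Python) =====
-- def _build_trechos_from_sede_destinos(
--     sede_uf: str, sede_cidade: str, destinos_list: list[dict[str, str]]
-- ) -> list[dict[str, str]]:
--     trechos: list[dict[str, str]] = []
--     origem_estado = (sede_uf or "").strip()
--     origem_cidade = (sede_cidade or "").strip()
--     if not origem_estado and not origem_cidade:
--         return trechos
--
--     current = {"uf": origem_estado, "cidade": origem_cidade}
--     for destino in destinos_list:
--         destino_estado = (destino.get("uf") or "").strip()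
--         destino_cidade = (destino.get("cidade") or "").strip()
--         if not destino_estado and not destino_cidade:
--             continue
--         if not current["uf"] and not current["cidade"]:
--             break
--         trechos.append(
--             {
--                 "origem_estado": current["uf"],
--                 "origem_cidade": current["cidade"],
--                 "destino_estado": destino_estado,
--                 "destino_cidade": destino_cidade,
--                 "saida_data": "",
--                 "saida_hora": "",
--                 "chegada_data": "",
--                 "chegada_hora": "",
--             }
--         )
--         current = {"uf": destino_estado, "cidade": destino_cidade}
--
--     return trechos
-- ===== SOURCE B (Python) =====
-- def _build_trechos_from_sede_destinos(
--     sede_uf: str, sede_cidade: str, destinos_list: list[dict[str, str]]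
-- ) -> list[dict[str, str]]:
--     origem_estado = (sede_uf or "").strip()
--     origem_cidade = (sede_cidade or "").strip()
--     if not origem_estado and not origem_cidade:
--         return []
--     nodes = [{"uf": origem_estado, "cidade": origem_cidade}]
--     for destino in destinos_list:
--         uf = (destino.get("uf") or "").strip()
--         cidade = (destino.get("cidade") or "").strip()
--         if uf or cidade:
--             nodes.append({"uf": uf, "cidade": cidade})
--     return [
--         {
--             "origem_estado": a["uf"],
--             "origem_cidade": a["cidade"],
--             "destino_estado": b["uf"],
--             "destino_cidade": b["cidade"],
--             "saida_data": "",
--             "saida_hora": "",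
--             "chegada_data": "",
--             "chegada_hora": "",
--         }
--         for a, b in zip(nodes, nodes[1:])
--     ]
-- ===== Notes on version B (the rewrite author's own statement) =====
-- stated objective: simpler
-- what changed: Replaces the stateful 'current'-carrying loop (with its unreachable break) by two phases: filter the non-empty stripped nodes into a list headed by the sede, then pair adjacent nodes with zip(nodes, nodes[1:]).
import Mathlib
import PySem

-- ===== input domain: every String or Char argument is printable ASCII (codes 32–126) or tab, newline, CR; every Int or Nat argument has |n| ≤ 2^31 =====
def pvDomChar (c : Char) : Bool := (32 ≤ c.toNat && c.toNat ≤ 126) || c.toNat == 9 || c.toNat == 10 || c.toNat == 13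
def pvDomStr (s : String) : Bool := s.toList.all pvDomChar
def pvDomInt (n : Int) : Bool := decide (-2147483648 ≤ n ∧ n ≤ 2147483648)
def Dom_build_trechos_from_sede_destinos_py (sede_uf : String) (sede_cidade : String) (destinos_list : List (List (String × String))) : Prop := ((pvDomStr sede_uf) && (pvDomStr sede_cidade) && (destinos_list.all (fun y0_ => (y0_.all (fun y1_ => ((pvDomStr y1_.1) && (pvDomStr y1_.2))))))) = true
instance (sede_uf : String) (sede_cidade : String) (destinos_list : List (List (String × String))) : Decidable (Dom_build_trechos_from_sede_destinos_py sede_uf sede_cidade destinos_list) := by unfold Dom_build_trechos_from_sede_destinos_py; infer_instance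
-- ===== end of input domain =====

-- ===== PORT A =====
-- A mutates nothing; return value only. Equivalence is about the return value.
def pvGetUC (d : List (String × String)) (k : String) : String :=
  PySem.Str.strip (((PySem.Dict.mk d).get? k).getD "")

def pvTrecho (ou oc du dc : String) : List (String × String) :=
  [("origem_estado", ou), ("origem_cidade", oc), ("destino_estado", du),
   ("destino_cidade", dc), ("saida_data", ""), ("saida_hora", ""),
   ("chegada_data", ""), ("chegada_hora", "")]

-- the for-loop of A: state = (current uf, current cidade, trechos accumulator); 'break' returns acc
def pvLoopA (cu cc : String) (acc : List (List (String × String))) :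
    List (List (String × String)) → List (List (String × String))
  | [] => acc
  | d :: ds =>
    let du := pvGetUC d "uf"
    let dc := pvGetUC d "cidade"
    if du = "" ∧ dc = "" then pvLoopA cu cc acc ds
    else if cu = "" ∧ cc = "" then acc
    else pvLoopA du dc (acc ++ [pvTrecho cu cc du dc]) ds

def build_trechos_from_sede_destinos_py (sede_uf : String) (sede_cidade : String) (destinos_list : List (List (String × String))) : List (List (String × String)) :=
  let origem_estado := PySem.Str.strip sede_uf
  let origem_cidade := PySem.Str.strip sede_cidade
  if origem_estado = "" ∧ origem_cidade = "" then []
  else pvLoopA origem_estado origem_cidade [] destinos_list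

-- ===== PORT B =====
-- B: collect non-empty stripped nodes after the sede node, then pair adjacent nodes
def pvNodesB : List (List (String × String)) → List (String × String)
  | [] => []
  | d :: ds =>
    let uf := pvGetUC d "uf"
    let cidade := pvGetUC d "cidade"
    if uf ≠ "" ∨ cidade ≠ "" then (uf, cidade) :: pvNodesB ds else pvNodesB ds

def pvPairs (nodes : List (String × String)) : List (List (String × String)) :=
  (nodes.zip nodes.tail).map (fun ab => pvTrecho ab.1.1 ab.1.2 ab.2.1 ab.2.2)

def build_trechos_from_sede_destinos_py_alt (sede_uf : String) (sede_cidade : String) (destinos_list : List (List (String × String))) : List (List (String × String)) :=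
  let origem_estado := PySem.Str.strip sede_uf
  let origem_cidade := PySem.Str.strip sede_cidade
  if origem_estado = "" ∧ origem_cidade = "" then []
  else pvPairs ((origem_estado, origem_cidade) :: pvNodesB destinos_list)

-- ===== PRECONDITION & SPEC =====
def Spec_build_trechos_from_sede_destinos_py (sede_uf : String) (sede_cidade : String) (destinos_list : List (List (String × String))) (out : List (List (String × String))) : Prop := out = build_trechos_from_sede_destinos_py_alt sede_uf sede_cidade destinos_list
instance (sede_uf : String) (sede_cidade : String) (destinos_list : List (List (String × String))) (out : List (List (String × String))) : Decidable (Spec_build_trechos_from_sede_destinos_py sede_uf sede_cidade destinos_list out) := by unfold Spec_build_trechos_from_sede_destinos_py; infer_instance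

-- ===== CLAIM (what is proved, stated in full; the proofs are below) =====
def Claim_equal_build_trechos_from_sede_destinos_py : Prop := ∀ (sede_uf : String) (sede_cidade : String) (destinos_list : List (List (String × String))), Dom_build_trechos_from_sede_destinos_py sede_uf sede_cidade destinos_list → Spec_build_trechos_from_sede_destinos_py sede_uf sede_cidade destinos_list (build_trechos_from_sede_destinos_py sede_uf sede_cidade destinos_list)

-- ===== LEMMAS AND PROOFS =====
lemma pvPairs_cons_cons (a b : String × String) (l : List (String × String)) :
    pvPairs (a :: b :: l) = pvTrecho a.1 a.2 b.1 b.2 :: pvPairs (b :: l) := by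
  simp [pvPairs]

lemma pvLoopA_eq_pairs (ds : List (List (String × String))) :
    ∀ (cu cc : String) (acc : List (List (String × String))),
      ¬ (cu = "" ∧ cc = "") →
      pvLoopA cu cc acc ds = acc ++ pvPairs ((cu, cc) :: pvNodesB ds) := by
  induction ds with
  | nil => intro cu cc acc _; simp [pvLoopA, pvNodesB, pvPairs]
  | cons d ds ih =>
    intro cu cc acc hne
    by_cases hskip : pvGetUC d "uf" = "" ∧ pvGetUC d "cidade" = ""
    · have h2 : ¬ (pvGetUC d "uf" ≠ "" ∨ pvGetUC d "cidade" ≠ "") := by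
        rcases hskip with ⟨h1, h2⟩; rw [h1, h2]; simp
      simp only [pvLoopA, pvNodesB, if_pos hskip, if_neg h2]
      exact ih cu cc acc hne
    · have h2 : pvGetUC d "uf" ≠ "" ∨ pvGetUC d "cidade" ≠ "" := not_and_or.mp hskip
      simp only [pvLoopA, pvNodesB, if_neg hskip, if_neg hne, if_pos h2]
      rw [ih (pvGetUC d "uf") (pvGetUC d "cidade") _ hskip,
          pvPairs_cons_cons (cu, cc) (pvGetUC d "uf", pvGetUC d "cidade")]
      simp

-- ===== VERDICT (by name: the statement is the Claim_ definition above) =====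
theorem build_trechos_from_sede_destinos_py_spec : Claim_equal_build_trechos_from_sede_destinos_py := by
  intro su sc ds _
  unfold Spec_build_trechos_from_sede_destinos_py
  unfold build_trechos_from_sede_destinos_py build_trechos_from_sede_destinos_py_alt
  by_cases h : PySem.Str.strip su = "" ∧ PySem.Str.strip sc = ""
  · simp [h]
  · simp only [if_neg h]
    exact pvLoopA_eq_pairs ds _ _ [] h |>.trans (by simp)
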